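-- pv_equiv track=rewrite | github.com/geemaple/leetcode | lintcode/3889.amount-of-new-area-painted-each-day.py | amount_painted
-- ===== SOURCE A (Python) =====
-- from typing import (
--     List,
-- )
--
-- def amount_painted(paint: List[List[int]]) -> List[int]:
--     # write your code here
--     n = len(paint)
--     line = [0] * 50001
--     res = [0 for i in range(n)]
--     for i in range(n):
--         start, end = paint[i]
--         while start < end:
--             jump = max(start + 1, line[start])
--             res[i] += 1 if line[start] == 0 else 0
--             line[start] = max(line[start], end)
--             start = jump
--     return res
-- ===== SOURCE B (Python) =====
-- def amount_painted(paint):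
--     res = []
--     ivs = []  # pairwise-disjoint painted intervals [a, b)
--     for start, end in paint:
--         if start >= end:
--             res.append(0)
--             continue
--         kept = []
--         lo, hi, covered = start, end, 0
--         for a, b in ivs:
--             if b <= start or end <= a:
--                 kept.append((a, b))
--             else:
--                 covered += min(b, end) - max(a, start)
--                 lo = min(lo, a)
--                 hi = max(hi, b)
--         res.append((end - start) - covered)
--         kept.append((lo, hi))
--         ivs = kept
--     return res
-- ===== Notes on version B (the rewrite author's own statement) =====
-- stated objective: alternative
-- what changed: Replaces A's per-cell jump-pointer sweep over a fixed 50001-cell array with a data-structure change: the painted region is kept as a list of pairwise-disjoint merged intervals, and each day one pass over it computes the covered length and merges the overlapping intervals with the new one.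
-- outside the precondition, e.g. on amount_painted([[-1, 1], [50000, 50001]]): A returns [2, 0], B returns [2, 1]; on amount_painted([[-2, 1]]): A returns [2], B returns [3]; on amount_painted([[0, 60000]]): A raises IndexError, B returns [60000]
import Mathlib
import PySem

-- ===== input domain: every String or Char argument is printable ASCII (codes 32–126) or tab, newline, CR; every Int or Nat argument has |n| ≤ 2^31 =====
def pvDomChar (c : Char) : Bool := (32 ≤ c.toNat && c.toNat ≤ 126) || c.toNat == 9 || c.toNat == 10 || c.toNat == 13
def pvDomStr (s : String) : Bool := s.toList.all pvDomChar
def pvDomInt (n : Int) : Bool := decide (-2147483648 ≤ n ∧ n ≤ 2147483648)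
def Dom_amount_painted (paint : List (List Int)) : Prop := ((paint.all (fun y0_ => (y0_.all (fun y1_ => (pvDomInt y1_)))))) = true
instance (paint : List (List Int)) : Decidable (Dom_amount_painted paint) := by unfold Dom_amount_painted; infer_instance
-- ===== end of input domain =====

-- B keeps the painted region as a list of disjoint merged intervals instead of A's fixed
-- 50001-cell array with per-cell jump pointers (objective: alternative data structure).

-- ===== PORT A =====
-- row destructuring 'start, end = row' (None when the unpacking would raise ValueError);
-- shared by Pre_ below, defined first so the [s, e] match shape has one neutral owner
def pvRowSE (row : List Int) : Option (Int × Int) :=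
  match row with
  | [s, e] => some (s, e)
  | _ => none

-- the 'while start < end' loop of A: threads the cell array 'line' and the counter res[i]
def pvPaintLoop (line : List Int) (s e acc : Int) : List Int × Int :=
  if _h : s < e then
    let v := PySem.List.pyGetD line s 0        -- line[start] (read once; Python reads the same value thrice)
    let jump := max (s + 1) v
    let acc' := acc + (if v = 0 then 1 else 0)
    let line' := PySem.List.pySetD line s (max v e)
    pvPaintLoop line' jump e acc'
  else (line, acc)
termination_by (e - s).toNat
decreasing_by
  have h1 : s + 1 ≤ max (s + 1) (PySem.List.pyGetD line s 0) := le_max_left _ _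
  omega

def amount_painted (paint : List (List Int)) : List Int :=
  ((List.range paint.length).foldl (fun (st : List Int × List Int) i =>
    match paint.getD i [] with          -- 'start, end = paint[i]'; a row not of length 2 raises (outside Pre_)
    | [s, e] =>
      let r := pvPaintLoop st.1 s e (st.2.getD i 0)
      (r.1, st.2.set i r.2)
    | _ => st)
    (List.replicate 50001 (0 : Int), List.replicate paint.length (0 : Int))).2

-- ===== PORT B =====
def amount_painted_alt (paint : List (List Int)) : List Int :=
  (paint.foldl (fun (st : List (Int × Int) × List Int) row =>
    match row with                       -- 'for start, end in paint' (a malformed row raises: outside Pre_)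
    | [s, e] =>
      if s < e then
        let m := st.1.foldl (fun (m : List (Int × Int) × Int × Int × Int) ab =>
            if ab.2 ≤ s ∨ e ≤ ab.1 then (m.1 ++ [ab], m.2)
            else (m.1, min m.2.1 ab.1, max m.2.2.1 ab.2, m.2.2.2 + (min ab.2 e - max ab.1 s)))
          ([], s, e, 0)
        (m.1 ++ [(m.2.1, m.2.2.1)], st.2 ++ [(e - s) - m.2.2.2])
      else (st.1, st.2 ++ [0])
    | _ => (st.1, st.2 ++ [0])) ([], [])).2

-- ===== PRECONDITION & SPEC =====
-- Pre_ restricts to the problem's coordinate domain that A's fixed 50001-cell array embodies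
-- (rows [s, e] with 0 ≤ s and e ≤ 50001 whenever s < e): outside it A raises IndexError for
-- large coordinates, and for negative starts its value comes from negative-index wraparound
-- into the top of the array and a jump that skips negative cells, which B does not reproduce
-- (on some such inputs, e.g. a lone [-1, 1], the two values still coincide by accident).
def pvRowOk (row : List Int) : Bool :=
  match pvRowSE row with
  | some (s, e) => decide (s < e → 0 ≤ s ∧ e ≤ 50001)
  | none => false

def Pre_amount_painted (paint : List (List Int)) : Prop := ∀ row ∈ paint, pvRowOk row = true
instance (paint : List (List Int)) : Decidable (Pre_amount_painted paint) := by
  unfold Pre_amount_painted; infer_instance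

def pvWitness_amount_painted : List (List Int) := [[0, 3], [2, 5], [10, 10]]

def Spec_amount_painted (paint : List (List Int)) (out : List Int) : Prop := out = amount_painted_alt paint
instance (paint : List (List Int)) (out : List Int) : Decidable (Spec_amount_painted paint out) := by unfold Spec_amount_painted; infer_instance

-- ===== CLAIM (what is proved, stated in full; the proofs are below) =====
def Claim_equal_amount_painted : Prop := ∀ (paint : List (List Int)), Dom_amount_painted paint → Pre_amount_painted paint → Spec_amount_painted paint (amount_painted paint)

-- ===== LEMMAS AND PROOFS =====

-- the common abstraction: both programs compute, per day, (e−s) − |P ∩ [s,e)| where P is the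
-- set of already painted cells, and then add [s,e) to P
noncomputable def pvSpecRes (P : Finset ℤ) : List (List Int) → List Int
  | [] => []
  | row :: rest =>
    match row with
    | [s, e] =>
      if s < e then
        ((e - s) - ((Finset.Ico s e) ∩ P).card) :: pvSpecRes (P ∪ Finset.Ico s e) rest
      else 0 :: pvSpecRes P rest
    | _ => 0 :: pvSpecRes P rest

-- ---------- B side ----------

-- named copies (definitionally equal) of the two fold bodies of amount_painted_alt
def pvBInnerStep (s e : ℤ) (m : List (Int × Int) × Int × Int × Int) (ab : Int × Int) :
    List (Int × Int) × Int × Int × Int :=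
  if ab.2 ≤ s ∨ e ≤ ab.1 then (m.1 ++ [ab], m.2)
  else (m.1, min m.2.1 ab.1, max m.2.2.1 ab.2, m.2.2.2 + (min ab.2 e - max ab.1 s))

def pvBStep (st : List (Int × Int) × List Int) (row : List Int) : List (Int × Int) × List Int :=
  match row with
  | [s, e] =>
    if s < e then
      let m := st.1.foldl (fun (m : List (Int × Int) × Int × Int × Int) ab =>
          if ab.2 ≤ s ∨ e ≤ ab.1 then (m.1 ++ [ab], m.2)
          else (m.1, min m.2.1 ab.1, max m.2.2.1 ab.2, m.2.2.2 + (min ab.2 e - max ab.1 s)))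
        ([], s, e, 0)
      (m.1 ++ [(m.2.1, m.2.2.1)], st.2 ++ [(e - s) - m.2.2.2])
    else (st.1, st.2 ++ [0])
  | _ => (st.1, st.2 ++ [0])

theorem pvBStep_inner (st : List (Int × Int) × List Int) (s e : ℤ) (hse : s < e) :
    pvBStep st [s, e] =
      (((st.1.foldl (pvBInnerStep s e) ([], s, e, 0)).1 ++
          [((st.1.foldl (pvBInnerStep s e) ([], s, e, 0)).2.1,
            (st.1.foldl (pvBInnerStep s e) ([], s, e, 0)).2.2.1)]),
        st.2 ++ [(e - s) - (st.1.foldl (pvBInnerStep s e) ([], s, e, 0)).2.2.2]) := by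
  simp only [pvBStep, if_pos hse]
  rfl

noncomputable def pvIco (ab : Int × Int) : Finset ℤ := Finset.Ico ab.1 ab.2

noncomputable def pvUnion (l : List (Int × Int)) : Finset ℤ :=
  l.foldr (fun ab acc => pvIco ab ∪ acc) ∅

def pvDisj (x y : Int × Int) : Prop := Disjoint (pvIco x) (pvIco y)

def pvIvsInv (ivs : List (Int × Int)) (P : Finset ℤ) : Prop :=
  (∀ ab ∈ ivs, ab.1 < ab.2) ∧ List.Pairwise pvDisj ivs ∧ pvUnion ivs = P

theorem pvUnion_nil : pvUnion [] = ∅ := rfl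

theorem pvUnion_cons (ab : Int × Int) (l : List (Int × Int)) :
    pvUnion (ab :: l) = pvIco ab ∪ pvUnion l := rfl

theorem pvUnion_append (l₁ l₂ : List (Int × Int)) :
    pvUnion (l₁ ++ l₂) = pvUnion l₁ ∪ pvUnion l₂ := by
  induction l₁ with
  | nil => simp [pvUnion_nil]
  | cons ab t ih => simp only [List.cons_append, pvUnion_cons, ih, Finset.union_assoc]

theorem pvDisj_Ico (a b s e : ℤ) (h : b ≤ s ∨ e ≤ a) :
    Disjoint (Finset.Ico a b) (Finset.Ico s e) := by
  rw [Finset.disjoint_left]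
  intro x hx hx'
  simp only [Finset.mem_Ico] at hx hx'
  omega

-- the inner fold of B, run from a partially merged state; Q is the (ghost) union of the
-- already-processed intervals
theorem pvInnerB (s e : ℤ) (hse : s < e) :
    ∀ (l kept0 : List (Int × Int)) (lo hi covered : ℤ) (Q : Finset ℤ)
      (kept' : List (Int × Int)) (lo' hi' cov' : ℤ),
    (∀ ab ∈ l, ab.1 < ab.2) →
    List.Pairwise pvDisj l →
    (∀ y ∈ l, Disjoint (pvIco y) Q) →
    (∀ x ∈ kept0, x.1 < x.2) →
    List.Pairwise pvDisj kept0 →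
    (∀ x ∈ kept0, ∀ y ∈ l, pvDisj x y) →
    (∀ x ∈ kept0, Disjoint (pvIco x) (Finset.Ico lo hi)) →
    lo ≤ s → e ≤ hi →
    pvUnion kept0 ∪ Finset.Ico lo hi = Q ∪ Finset.Ico s e →
    covered = ((Finset.Ico s e ∩ Q).card : ℤ) →
    l.foldl (pvBInnerStep s e) (kept0, lo, hi, covered) = (kept', lo', hi', cov') →
    (∀ x ∈ kept', x.1 < x.2) ∧
    List.Pairwise pvDisj kept' ∧
    (∀ x ∈ kept', Disjoint (pvIco x) (Finset.Ico lo' hi')) ∧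
    lo' ≤ s ∧ e ≤ hi' ∧
    pvUnion kept' ∪ Finset.Ico lo' hi' = (Q ∪ pvUnion l) ∪ Finset.Ico s e ∧
    cov' = ((Finset.Ico s e ∩ (Q ∪ pvUnion l)).card : ℤ) := by
  intro l
  induction l with
  | nil =>
    intro kept0 lo hi covered Q kept' lo' hi' cov' _ _ _ h4 h5 _ h7 h8a h8b h9 h10 hfold
    simp only [List.foldl_nil, Prod.mk.injEq] at hfold
    obtain ⟨rfl, rfl, rfl, rfl⟩ := hfold
    refine ⟨h4, h5, h7, h8a, h8b, ?_, ?_⟩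
    · rw [pvUnion_nil, Finset.union_empty]; exact h9
    · rw [pvUnion_nil, Finset.union_empty]; exact h10
  | cons ab l ih =>
    intro kept0 lo hi covered Q kept' lo' hi' cov' h1 h2 h3 h4 h5 h6 h7 h8a h8b h9 h10 hfold
    rw [List.pairwise_cons] at h2
    obtain ⟨hhd, h2tl⟩ := h2
    have hab : ab.1 < ab.2 := h1 ab List.mem_cons_self
    rw [List.foldl_cons] at hfold
    by_cases hc : ab.2 ≤ s ∨ e ≤ ab.1
    · -- ab is disjoint from [s,e): it is kept
      rw [pvBInnerStep, if_pos hc] at hfold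
      have hdq : Disjoint (pvIco ab) Q := h3 ab List.mem_cons_self
      have hdse : Disjoint (pvIco ab) (Finset.Ico s e) := pvDisj_Ico _ _ _ _ hc
      have res := ih (kept0 ++ [ab]) lo hi covered (Q ∪ pvIco ab) kept' lo' hi' cov'
        (fun y hy => h1 y (List.mem_cons_of_mem _ hy)) h2tl
        (fun y hy => by
          rw [Finset.disjoint_union_right]
          exact ⟨h3 y (List.mem_cons_of_mem _ hy), (hhd y hy).symm⟩)
        (fun x hx => by
          rcases List.mem_append.mp hx with hx | hx
          · exact h4 x hx
          · rw [List.mem_singleton.mp hx]; exact hab)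
        (by
          rw [List.pairwise_append]
          exact ⟨h5, List.pairwise_singleton _ _,
            fun x hx y hy => by rw [List.mem_singleton.mp hy]; exact h6 x hx ab List.mem_cons_self⟩)
        (fun x hx y hy => by
          rcases List.mem_append.mp hx with hx | hx
          · exact h6 x hx y (List.mem_cons_of_mem _ hy)
          · rw [List.mem_singleton.mp hx]; exact hhd y hy)
        (fun x hx => by
          rcases List.mem_append.mp hx with hx | hx
          · exact h7 x hx
          · rw [List.mem_singleton.mp hx]
            have hsub : Finset.Ico lo hi ⊆ Q ∪ Finset.Ico s e := by
              rw [← h9]; exact Finset.subset_union_right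
            exact Finset.disjoint_of_subset_right hsub
              (by rw [Finset.disjoint_union_right]; exact ⟨hdq, hdse⟩))
        h8a h8b
        (by
          rw [pvUnion_append, pvUnion_cons, pvUnion_nil, Finset.union_empty]
          have h9x := Finset.ext_iff.mp h9
          ext x
          have := h9x x
          simp only [Finset.mem_union] at *
          tauto)
        (by
          rw [Finset.inter_union_distrib_left,
            Finset.disjoint_iff_inter_eq_empty.mp hdse.symm, Finset.union_empty]
          exact h10)
        hfold
      refine ⟨res.1, res.2.1, res.2.2.1, res.2.2.2.1, res.2.2.2.2.1, ?_, ?_⟩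
      · rw [res.2.2.2.2.2.1]
        have : (Q ∪ pvIco ab) ∪ pvUnion l = Q ∪ pvUnion (ab :: l) := by
          rw [pvUnion_cons]; ext x; simp only [Finset.mem_union]; tauto
        rw [this]
      · rw [res.2.2.2.2.2.2]
        have : (Q ∪ pvIco ab) ∪ pvUnion l = Q ∪ pvUnion (ab :: l) := by
          rw [pvUnion_cons]; ext x; simp only [Finset.mem_union]; tauto
        rw [this]
    · -- ab overlaps [s,e): it is merged
      rw [pvBInnerStep, if_neg hc] at hfold
      push Not at hc
      obtain ⟨hc1, hc2⟩ := hc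
      have hdq : Disjoint (pvIco ab) Q := h3 ab List.mem_cons_self
      have hIco : Finset.Ico (min lo ab.1) (max hi ab.2) = Finset.Ico lo hi ∪ pvIco ab := by
        rw [pvIco]
        ext x
        simp only [Finset.mem_union, Finset.mem_Ico]
        omega
      have res := ih kept0 (min lo ab.1) (max hi ab.2)
        (covered + (min ab.2 e - max ab.1 s)) (Q ∪ pvIco ab) kept' lo' hi' cov'
        (fun y hy => h1 y (List.mem_cons_of_mem _ hy)) h2tl
        (fun y hy => by
          rw [Finset.disjoint_union_right]
          exact ⟨h3 y (List.mem_cons_of_mem _ hy), (hhd y hy).symm⟩)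
        h4 h5
        (fun x hx y hy => h6 x hx y (List.mem_cons_of_mem _ hy))
        (fun x hx => by
          rw [hIco, Finset.disjoint_union_right]
          exact ⟨h7 x hx, h6 x hx ab List.mem_cons_self⟩)
        (le_trans (min_le_left _ _) h8a) (le_trans h8b (le_max_left _ _))
        (by
          rw [hIco]
          have h9x := Finset.ext_iff.mp h9
          ext x
          have := h9x x
          simp only [Finset.mem_union] at *
          tauto)
        (by
          have hcard : (Finset.Ico s e ∩ pvIco ab).card = (min e ab.2 - max s ab.1).toNat := by
            rw [pvIco, Finset.Ico_inter_Ico, Int.card_Ico]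
          have hdisj2 : Disjoint (Finset.Ico s e ∩ Q) (Finset.Ico s e ∩ pvIco ab) :=
            Finset.disjoint_of_subset_left Finset.inter_subset_right
              (Finset.disjoint_of_subset_right Finset.inter_subset_right hdq.symm)
          rw [Finset.inter_union_distrib_left, Finset.card_union_of_disjoint hdisj2, hcard]
          have hpos : max s ab.1 < min e ab.2 := by omega
          push_cast [Int.toNat_of_nonneg (by omega : (0:ℤ) ≤ min e ab.2 - max s ab.1)]
          omega)
        hfold
      refine ⟨res.1, res.2.1, res.2.2.1, res.2.2.2.1, res.2.2.2.2.1, ?_, ?_⟩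
      · rw [res.2.2.2.2.2.1]
        have : (Q ∪ pvIco ab) ∪ pvUnion l = Q ∪ pvUnion (ab :: l) := by
          rw [pvUnion_cons]; ext x; simp only [Finset.mem_union]; tauto
        rw [this]
      · rw [res.2.2.2.2.2.2]
        have : (Q ∪ pvIco ab) ∪ pvUnion l = Q ∪ pvUnion (ab :: l) := by
          rw [pvUnion_cons]; ext x; simp only [Finset.mem_union]; tauto
        rw [this]

-- the outer fold of B
theorem pvBGo : ∀ (paint : List (List Int)) (ivs : List (Int × Int)) (res : List Int) (P : Finset ℤ),
    pvIvsInv ivs P →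
    (paint.foldl pvBStep (ivs, res)).2 = res ++ pvSpecRes P paint := by
  intro paint
  induction paint with
  | nil => intro ivs res P _; simp [pvSpecRes]
  | cons row rest ih =>
    intro ivs res P hinv
    obtain ⟨hab, hpw, hun⟩ := hinv
    rw [List.foldl_cons]
    have hskip : ∀ res0 : List Int, (rest.foldl pvBStep (ivs, res0)).2 = res0 ++ pvSpecRes P rest :=
      fun res0 => ih ivs res0 P ⟨hab, hpw, hun⟩
    match row with
    | [] =>
      rw [show pvBStep (ivs, res) [] = (ivs, res ++ [0]) from rfl, hskip]
      simp [pvSpecRes]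
    | [s] =>
      rw [show pvBStep (ivs, res) [s] = (ivs, res ++ [0]) from rfl, hskip]
      simp [pvSpecRes]
    | s :: e :: x :: t =>
      rw [show pvBStep (ivs, res) (s :: e :: x :: t) = (ivs, res ++ [0]) from rfl, hskip]
      simp [pvSpecRes]
    | [s, e] =>
      by_cases hse : s < e
      · rw [pvBStep_inner (ivs, res) s e hse]
        rcases hF : ivs.foldl (pvBInnerStep s e) ([], s, e, 0) with ⟨kept', lo', hi', cov'⟩
        have res' := pvInnerB s e hse ivs [] s e 0 ∅ kept' lo' hi' cov'
          hab hpw (fun y _ => Finset.disjoint_empty_right _)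
          (fun x hx => absurd hx (List.not_mem_nil))
          List.Pairwise.nil
          (fun x hx => absurd hx (List.not_mem_nil))
          (fun x hx => absurd hx (List.not_mem_nil))
          le_rfl le_rfl
          (by rw [pvUnion_nil])
          (by simp)
          hF
        obtain ⟨r1, r2, r3, r4, r5, r6, r7⟩ := res'
        dsimp only
        have hinv' : pvIvsInv (kept' ++ [(lo', hi')]) (P ∪ Finset.Ico s e) := by
          refine ⟨?_, ?_, ?_⟩
          · intro x hx
            rcases List.mem_append.mp hx with hx | hx
            · exact r1 x hx
            · rw [List.mem_singleton.mp hx]; exact by dsimp; omega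
          · rw [List.pairwise_append]
            refine ⟨r2, List.pairwise_singleton _ _, fun x hx y hy => ?_⟩
            rw [List.mem_singleton.mp hy]
            exact r3 x hx
          · rw [pvUnion_append, pvUnion_cons, pvUnion_nil, Finset.union_empty]
            have h6x := Finset.ext_iff.mp r6
            have hux := Finset.ext_iff.mp hun
            ext x
            have := h6x x
            have := hux x
            simp only [Finset.mem_union, Finset.notMem_empty, false_or] at *
            rw [show pvIco (lo', hi') = Finset.Ico lo' hi' from rfl]
            tauto
        rw [ih (kept' ++ [(lo', hi')]) (res ++ [e - s - cov']) (P ∪ Finset.Ico s e) hinv']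
        have hcov : cov' = ((Finset.Ico s e ∩ P).card : ℤ) := by
          rw [r7, Finset.empty_union, hun]
        rw [pvSpecRes, hcov]
        simp [if_pos hse, List.append_assoc]
      · rw [show pvBStep (ivs, res) [s, e] = if s < e then _ else (ivs, res ++ [0]) from rfl,
          if_neg hse, hskip]
        simp [pvSpecRes, if_neg hse]

theorem amount_painted_alt_eq (paint : List (List Int)) :
    amount_painted_alt paint = pvSpecRes ∅ paint := by
  have h := pvBGo paint [] [] ∅ ⟨by simp, by simp, rfl⟩
  exact h

-- ---------- A side ----------

-- named copy (definitionally equal) of the fold body of amount_painted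
def pvAStep (paint : List (List Int)) (st : List Int × List Int) (i : ℕ) : List Int × List Int :=
  match paint.getD i [] with
  | [s, e] =>
    let r := pvPaintLoop st.1 s e (st.2.getD i 0)
    (r.1, st.2.set i r.2)
  | _ => st

def pvLget (line : List Int) (p : ℤ) : ℤ := PySem.List.pyGetD line p 0

-- A's array invariant, for cells p ≥ s: line[p] = 0 means p unpainted; otherwise line[p] is a
-- bound e' with [p, e') entirely painted
def pvLineInvFrom (line : List Int) (P : Finset ℤ) (s : ℤ) : Prop :=
  ∀ p : ℤ, s ≤ p → p ≤ 50000 → 0 ≤ p →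
    (pvLget line p = 0 ∧ p ∉ P) ∨
    (p < pvLget line p ∧ pvLget line p ≤ 50001 ∧ ∀ q, p ≤ q → q < pvLget line p → q ∈ P)

theorem pvLget_set (line : List Int) (s p x : ℤ) (h0 : 0 ≤ s) (h1 : s < (line.length : ℤ))
    (h2 : 0 ≤ p) (h3 : p < (line.length : ℤ)) :
    pvLget (PySem.List.pySetD line s x) p = if p = s then x else pvLget line p := by
  rw [pvLget, pvLget, PySem.List.pySetD_of_nonneg line x h0,
      PySem.List.pyGetD_eq_getElem _ 0 h2 (by simp; omega),
      PySem.List.pyGetD_eq_getElem _ 0 h2 (by omega)]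
  rcases eq_or_ne p s with rfl | hne
  · simp
  · have hne' : s.toNat ≠ p.toNat := by omega
    simp [hne', hne]

theorem pvPaintLoop_spec (e : ℤ) (he : e ≤ 50001) :
    ∀ (n : ℕ) (s : ℤ) (line : List Int) (acc : ℤ) (P : Finset ℤ),
    (e - s).toNat ≤ n → 0 ≤ s → line.length = 50001 → pvLineInvFrom line P s →
    (pvPaintLoop line s e acc).2 = acc + (((Finset.Ico s e) \ P).card : ℤ) ∧
    (pvPaintLoop line s e acc).1.length = 50001 ∧
    (∀ p, 0 ≤ p → p < s → pvLget (pvPaintLoop line s e acc).1 p = pvLget line p) ∧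
    pvLineInvFrom (pvPaintLoop line s e acc).1 (P ∪ Finset.Ico s e) s := by
  intro n
  induction n with
  | zero =>
    intro s line acc P hn h0 hlen hinv
    have hes : ¬ s < e := by omega
    rw [pvPaintLoop, dif_neg hes, Finset.Ico_eq_empty hes]
    refine ⟨by simp, hlen, fun p _ _ => rfl, ?_⟩
    rw [Finset.union_empty]
    exact hinv
  | succ n ihn =>
    intro s line acc P hn h0 hlen hinv
    by_cases hse : s < e
    · have hveq : PySem.List.pyGetD line s 0 = pvLget line s := rfl
      rw [pvPaintLoop, dif_pos hse]
      simp only [hveq]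
      have hs50 : s ≤ 50000 := by omega
      have hslen : s < (line.length : ℤ) := by rw [hlen]; omega
      rcases hinv s le_rfl hs50 h0 with ⟨hv, hsP⟩ | ⟨hvgt, hvle, hsub⟩
      · -- line[s] = 0 : a new cell
        rw [hv, if_pos rfl]
        have hjump : max (s + 1) (0 : ℤ) = s + 1 := max_eq_left (by omega)
        have hwrite : max (0 : ℤ) e = e := max_eq_right (by omega)
        rw [hjump, hwrite]
        have hlen1 : (PySem.List.pySetD line s e).length = 50001 := by
          rw [PySem.List.length_pySetD, hlen]
        have hget1 : ∀ p : ℤ, 0 ≤ p → p ≤ 50000 →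
            pvLget (PySem.List.pySetD line s e) p = if p = s then e else pvLget line p := by
          intro p hp0 hp50
          exact pvLget_set line s p e h0 hslen hp0 (by rw [hlen]; omega)
        have hinv1 : pvLineInvFrom (PySem.List.pySetD line s e) P (s + 1) := by
          intro p hp1 hp50 hp0
          rw [hget1 p hp0 hp50, if_neg (by omega)]
          exact hinv p (by omega) hp50 hp0
        have ih := ihn (s + 1) (PySem.List.pySetD line s e) (acc + 1) P (by omega) (by omega)
          hlen1 hinv1
        obtain ⟨ih1, ih2, ih3, ih4⟩ := ih
        have hins : Finset.Ico s e \ P = insert s (Finset.Ico (s + 1) e \ P) := by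
          ext x
          simp only [Finset.mem_sdiff, Finset.mem_Ico, Finset.mem_insert]
          constructor
          · rintro ⟨⟨hx1, hx2⟩, hx3⟩
            rcases eq_or_ne x s with rfl | hne
            · exact Or.inl rfl
            · exact Or.inr ⟨⟨by omega, hx2⟩, hx3⟩
          · rintro (rfl | ⟨⟨hx1, hx2⟩, hx3⟩)
            · exact ⟨⟨le_rfl, hse⟩, hsP⟩
            · exact ⟨⟨by omega, hx2⟩, hx3⟩
        refine ⟨?_, ih2, ?_, ?_⟩
        · rw [ih1, hins, Finset.card_insert_of_notMem (by simp [Finset.mem_sdiff])]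
          push_cast
          ring
        · intro p hp0 hps
          rw [ih3 p hp0 (by omega), hget1 p hp0 (by omega), if_neg (by omega)]
        · intro p hps hp50 hp0
          rcases eq_or_ne p s with rfl | hne
          · rw [ih3 p hp0 (by omega), hget1 p hp0 hp50, if_pos rfl]
            refine Or.inr ⟨hse, he, fun q hq1 hq2 => ?_⟩
            exact Finset.mem_union_right _ (Finset.mem_Ico.mpr ⟨hq1, hq2⟩)
          · rcases ih4 p (by omega) hp50 hp0 with ⟨hz, hnm⟩ | ⟨ha, hb, hc⟩
            · refine Or.inl ⟨hz, fun hmem => hnm ?_⟩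
              rcases Finset.mem_union.mp hmem with hmem | hmem
              · exact Finset.mem_union_left _ hmem
              · refine Finset.mem_union_right _ ?_
                rw [Finset.mem_Ico] at hmem ⊢
                omega
            · refine Or.inr ⟨ha, hb, fun q hq1 hq2 => ?_⟩
              rcases Finset.mem_union.mp (hc q hq1 hq2) with hmem | hmem
              · exact Finset.mem_union_left _ hmem
              · refine Finset.mem_union_right _ ?_
                rw [Finset.mem_Ico] at hmem ⊢
                omega
      · -- line[s] = v > s : cells [s, v) are already painted, jump to v
        have hvne : pvLget line s ≠ 0 := by omega
        rw [if_neg hvne, add_zero]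
        have hjump : max (s + 1) (pvLget line s) = pvLget line s := max_eq_right (by omega)
        rw [hjump]
        have hlen1 : (PySem.List.pySetD line s (max (pvLget line s) e)).length = 50001 := by
          rw [PySem.List.length_pySetD, hlen]
        have hget1 : ∀ p : ℤ, 0 ≤ p → p ≤ 50000 →
            pvLget (PySem.List.pySetD line s (max (pvLget line s) e)) p =
              if p = s then max (pvLget line s) e else pvLget line p := by
          intro p hp0 hp50
          exact pvLget_set line s p _ h0 hslen hp0 (by rw [hlen]; omega)
        set v := pvLget line s with hvdef
        have hinv1 : pvLineInvFrom (PySem.List.pySetD line s (max v e)) P v := by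
          intro p hp1 hp50 hp0
          rw [hget1 p hp0 hp50, if_neg (by omega)]
          exact hinv p (by omega) hp50 hp0
        have ih := ihn v (PySem.List.pySetD line s (max v e)) acc P (by omega) (by omega)
          hlen1 hinv1
        obtain ⟨ih1, ih2, ih3, ih4⟩ := ih
        have hsd : Finset.Ico s e \ P = Finset.Ico v e \ P := by
          ext x
          simp only [Finset.mem_sdiff, Finset.mem_Ico]
          constructor
          · rintro ⟨⟨hx1, hx2⟩, hx3⟩
            refine ⟨⟨?_, hx2⟩, hx3⟩
            by_contra hxv
            exact hx3 (hsub x hx1 (by omega))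
          · rintro ⟨⟨hx1, hx2⟩, hx3⟩
            exact ⟨⟨by omega, hx2⟩, hx3⟩
        refine ⟨?_, ih2, ?_, ?_⟩
        · rw [ih1, hsd]
        · intro p hp0 hps
          rw [ih3 p hp0 (by omega), hget1 p hp0 (by omega), if_neg (by omega)]
        · intro p hps hp50 hp0
          rcases max_choice v e with hm | hm
          · -- bookkeeping case split on which of v, e is larger is only needed for p = s
            rcases eq_or_ne p s with rfl | hne
            · rw [ih3 p hp0 (by omega), hget1 p hp0 hp50, if_pos rfl]
              refine Or.inr ⟨by omega, by omega, fun q hq1 hq2 => ?_⟩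
              exact Finset.mem_union_left _ (hsub q hq1 (by omega))
            · by_cases hpv : p < v
              · have hpP : p ∈ P := hsub p (by omega) hpv
                have hgp : pvLget (pvPaintLoop (PySem.List.pySetD line s (max v e)) v e acc).1 p
                    = pvLget line p := by
                  rw [ih3 p hp0 hpv, hget1 p hp0 hp50, if_neg hne]
                rcases hinv p (by omega) hp50 hp0 with ⟨hz, hnm⟩ | ⟨ha, hb, hc⟩
                · exact absurd hpP hnm
                · rw [hgp]
                  exact Or.inr ⟨ha, hb, fun q hq1 hq2 => Finset.mem_union_left _ (hc q hq1 hq2)⟩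
              · rcases ih4 p (by omega) hp50 hp0 with ⟨hz, hnm⟩ | ⟨ha, hb, hc⟩
                · refine Or.inl ⟨hz, fun hmem => hnm ?_⟩
                  rcases Finset.mem_union.mp hmem with hmem | hmem
                  · exact Finset.mem_union_left _ hmem
                  · refine Finset.mem_union_right _ ?_
                    rw [Finset.mem_Ico] at hmem ⊢
                    omega
                · refine Or.inr ⟨ha, hb, fun q hq1 hq2 => ?_⟩
                  rcases Finset.mem_union.mp (hc q hq1 hq2) with hmem | hmem
                  · exact Finset.mem_union_left _ hmem
                  · refine Finset.mem_union_right _ ?_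
                    rw [Finset.mem_Ico] at hmem ⊢
                    omega
          · rcases eq_or_ne p s with rfl | hne
            · rw [ih3 p hp0 (by omega), hget1 p hp0 hp50, if_pos rfl]
              refine Or.inr ⟨by omega, by omega, fun q hq1 hq2 => ?_⟩
              by_cases hqv : q < v
              · exact Finset.mem_union_left _ (hsub q hq1 hqv)
              · exact Finset.mem_union_right _ (Finset.mem_Ico.mpr ⟨by omega, by omega⟩)
            · by_cases hpv : p < v
              · have hpP : p ∈ P := hsub p (by omega) hpv
                have hgp : pvLget (pvPaintLoop (PySem.List.pySetD line s (max v e)) v e acc).1 p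
                    = pvLget line p := by
                  rw [ih3 p hp0 hpv, hget1 p hp0 hp50, if_neg hne]
                rcases hinv p (by omega) hp50 hp0 with ⟨hz, hnm⟩ | ⟨ha, hb, hc⟩
                · exact absurd hpP hnm
                · rw [hgp]
                  exact Or.inr ⟨ha, hb, fun q hq1 hq2 => Finset.mem_union_left _ (hc q hq1 hq2)⟩
              · rcases ih4 p (by omega) hp50 hp0 with ⟨hz, hnm⟩ | ⟨ha, hb, hc⟩
                · refine Or.inl ⟨hz, fun hmem => hnm ?_⟩
                  rcases Finset.mem_union.mp hmem with hmem | hmem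
                  · exact Finset.mem_union_left _ hmem
                  · refine Finset.mem_union_right _ ?_
                    rw [Finset.mem_Ico] at hmem ⊢
                    omega
                · refine Or.inr ⟨ha, hb, fun q hq1 hq2 => ?_⟩
                  rcases Finset.mem_union.mp (hc q hq1 hq2) with hmem | hmem
                  · exact Finset.mem_union_left _ hmem
                  · refine Finset.mem_union_right _ ?_
                    rw [Finset.mem_Ico] at hmem ⊢
                    omega
        
    · have hes := hse
      rw [pvPaintLoop, dif_neg hes, Finset.Ico_eq_empty hes]
      refine ⟨by simp, hlen, fun p _ _ => rfl, ?_⟩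
      rw [Finset.union_empty]
      exact hinv

-- the outer indexed loop of A
theorem pvAGo (paint : List (List Int)) (hpre : Pre_amount_painted paint) :
    ∀ (m k : ℕ) (line res : List Int) (P : Finset ℤ),
    k + m = paint.length → res.length = paint.length → (∀ j, k ≤ j → res.getD j 0 = 0) →
    line.length = 50001 → pvLineInvFrom line P 0 →
    ((List.range' k m).foldl (pvAStep paint) (line, res)).2 = res.take k ++ pvSpecRes P (paint.drop k) := by
  intro m
  induction m with
  | zero =>
    intro k line res P hkm hres _ _ _
    have hk : k = paint.length := by omega
    rw [List.range', List.foldl_nil, hk, List.drop_length,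
      List.take_of_length_le (by omega)]
    simp [pvSpecRes]
  | succ m ihm =>
    intro k line res P hkm hres hres0 hlen hinv
    have hklt : k < paint.length := by omega
    have hkres : k < res.length := by omega
    rw [List.range'_succ, List.foldl_cons]
    have hrow : paint.getD k [] = paint[k] := List.getD_eq_getElem paint [] hklt
    have hok := hpre paint[k] (paint.getElem_mem hklt)
    -- under Pre_, the k-th row has the shape [s, e]
    rcases hshape : paint[k] with _ | ⟨s, t⟩
    · rw [hshape] at hok; exact absurd hok (by simp [pvRowOk, pvRowSE])
    rcases t with _ | ⟨e, t2⟩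
    · rw [hshape] at hok; exact absurd hok (by simp [pvRowOk, pvRowSE])
    rcases t2 with _ | ⟨x, t3⟩
    swap
    · rw [hshape] at hok; exact absurd hok (by simp [pvRowOk, pvRowSE])
    rw [hshape] at hok
    have hcond0 : e ≤ s ∨ (0 ≤ s ∧ e ≤ 50001) := by simpa [pvRowOk, pvRowSE] using hok
    have hcond : s < e → 0 ≤ s ∧ e ≤ 50001 := fun h => hcond0.resolve_left (by omega)
    rw [hshape] at hrow
    have hstep : pvAStep paint (line, res) k =
        ((pvPaintLoop line s e (res.getD k 0)).1,
          res.set k (pvPaintLoop line s e (res.getD k 0)).2) := by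
      rw [pvAStep, hrow]
    rw [hstep, hres0 k le_rfl]
    have htake : ∀ c : Int, (res.set k c).take (k + 1) = res.take k ++ [c] := by
      intro c
      rw [List.take_add_one, List.take_set, List.set_eq_of_length_le (by simp),
        List.getElem?_set_self (by omega)]
      rfl
    have hsetlen : ∀ c : Int, (res.set k c).length = paint.length := by
      intro c; rw [List.length_set]; exact hres
    have hset0 : ∀ (c : Int) (j : ℕ), k + 1 ≤ j → (res.set k c).getD j 0 = 0 := by
      intro c j hj
      rw [List.getD_eq_getElem?_getD, List.getElem?_set_ne (by omega),
        ← List.getD_eq_getElem?_getD]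
      exact hres0 j (by omega)
    have hdrop : paint.drop k = [s, e] :: paint.drop (k + 1) := by
      rw [List.drop_eq_getElem_cons hklt, hshape]
    by_cases hse : s < e
    · obtain ⟨hs0, he1⟩ := hcond hse
      have hloop := pvPaintLoop_spec e he1 (e - s).toNat s line 0 P le_rfl hs0 hlen
        (fun p _ h50 h0 => hinv p h0 h50 h0)
      obtain ⟨hl1, hl2, hl3, hl4⟩ := hloop
      have hinv' : pvLineInvFrom (pvPaintLoop line s e 0).1 (P ∪ Finset.Ico s e) 0 := by
        intro p hp0 h50 _
        by_cases hps : p < s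
        · rw [hl3 p hp0 hps]
          rcases hinv p hp0 h50 hp0 with ⟨hz, hnm⟩ | ⟨ha, hb, hc⟩
          · refine Or.inl ⟨hz, fun hmem => ?_⟩
            rcases Finset.mem_union.mp hmem with hmem | hmem
            · exact hnm hmem
            · rw [Finset.mem_Ico] at hmem; omega
          · exact Or.inr ⟨ha, hb, fun q hq1 hq2 => Finset.mem_union_left _ (hc q hq1 hq2)⟩
        · exact hl4 p (by omega) h50 hp0
      rw [ihm (k + 1) (pvPaintLoop line s e 0).1 (res.set k (pvPaintLoop line s e 0).2)
        (P ∪ Finset.Ico s e) (by omega) (hsetlen _) (hset0 _) hl2 hinv',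
        htake, hdrop, hl1]
      have hval : 0 + (((Finset.Ico s e) \ P).card : ℤ) =
          (e - s) - (((Finset.Ico s e) ∩ P).card : ℤ) := by
        have hc := Finset.card_sdiff_add_card_inter (Finset.Ico s e) P
        rw [Int.card_Ico] at hc
        have : ((Finset.Ico s e) \ P).card + ((Finset.Ico s e) ∩ P).card = (e - s).toNat := hc
        omega
      rw [hval]
      simp [pvSpecRes, if_pos hse, List.append_assoc]
    · rw [pvPaintLoop, dif_neg hse]
      rw [ihm (k + 1) line (res.set k 0) P (by omega) (hsetlen _) (hset0 _) hlen hinv,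
        htake, hdrop]
      simp [pvSpecRes, if_neg hse, List.append_assoc]

theorem amount_painted_eq (paint : List (List Int)) (hpre : Pre_amount_painted paint) :
    amount_painted paint = pvSpecRes ∅ paint := by
  have hinv : pvLineInvFrom (List.replicate 50001 (0 : Int)) ∅ 0 := by
    intro p hp0 hp1 hp2
    left
    refine ⟨?_, by simp⟩
    rw [pvLget, PySem.List.pyGetD_eq_getElem _ 0 hp2
        (by rw [List.length_replicate]; omega)]
    rw [List.getElem_replicate]
  have h := pvAGo paint hpre paint.length 0 (List.replicate 50001 (0 : Int))
      (List.replicate paint.length (0 : Int)) ∅ (by omega) (by rw [List.length_replicate])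
      (by intro j _; simp only [List.getD_eq_getElem?_getD, List.getElem?_replicate]; split <;> rfl) (by rw [List.length_replicate]) hinv
  simp only [List.take_zero, List.drop_zero, List.nil_append] at h
  calc amount_painted paint
      = ((List.range' 0 paint.length).foldl (pvAStep paint)
          (List.replicate 50001 (0 : Int), List.replicate paint.length (0 : Int))).2 := by
        rw [amount_painted, List.range_eq_range']
        rfl
    _ = pvSpecRes ∅ paint := h


-- ===== VERDICT (by name: the statement is the Claim_ definition above) =====
theorem amount_painted_spec : Claim_equal_amount_painted := by
  intro paint _hdom hpre
  unfold Spec_amount_painted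
  rw [amount_painted_eq paint hpre, amount_painted_alt_eq]
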